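-- pv_equiv track=rewrite | github.com/kajusK/Advent-of-code-2019 | 17.py | groupInArray
-- ===== SOURCE A (Python) =====
-- def groupInArray(group, array):
--     res = []
--
--     for offset in range(len(array)-len(group)):
--         found = True
--         for x in range(len(group)):
--             if group[x] != array[offset+x]:
--                 found = False
--                 break
--         if found:
--             res.append(offset)
--
--     if len(res) < 2:
--         return False
--     return True
-- ===== SOURCE B (Python) =====
-- def groupInArray(group, array):
--     # Single pass over suffixes with slice comparison and early exit at the
--     # second match; keeps A's offset range range(len(array)-len(group)).
--     m = len(group)
--     hits = 0
--     suffix = array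
--     for _ in range(len(array) - m):
--         if suffix[:m] == group:
--             hits += 1
--             if hits == 2:
--                 return True
--         suffix = suffix[1:]
--     return False
-- ===== Notes on version B (the rewrite author's own statement) =====
-- stated objective: alternative
-- what changed: Instead of A's nested index loops collecting the full list of match offsets and counting it at the end, B walks the suffixes of the array once, tests each candidate by slice equality, counts matches and returns True as soon as the second match is found (early exit), preserving A's off-by-one offset range.
import Mathlib
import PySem

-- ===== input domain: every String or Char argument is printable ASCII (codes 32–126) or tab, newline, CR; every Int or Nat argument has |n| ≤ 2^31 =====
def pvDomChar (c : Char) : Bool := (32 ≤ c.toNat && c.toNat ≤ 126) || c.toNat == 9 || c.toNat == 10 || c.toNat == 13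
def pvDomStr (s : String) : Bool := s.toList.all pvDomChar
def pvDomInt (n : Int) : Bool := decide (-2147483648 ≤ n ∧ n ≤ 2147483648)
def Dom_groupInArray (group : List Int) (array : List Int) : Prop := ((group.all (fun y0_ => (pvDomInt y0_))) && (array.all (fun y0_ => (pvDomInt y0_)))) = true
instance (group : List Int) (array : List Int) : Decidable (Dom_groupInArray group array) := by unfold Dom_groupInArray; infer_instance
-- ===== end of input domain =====

-- B replaces A's nested index loops (collect all match offsets, count at the end) by one
-- suffix walk with slice comparison and an early exit at the second match (objective: alternative).

-- ===== PORT A =====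
-- inner 'for x in range(len(group)): if group[x] != array[offset+x]: found = False; break'
-- (pyGetD is exact here: every executed index is in range, since offset < len(array)-len(group))
def pvInnerA (group array : List Int) (offset : Int) : List Int → Bool
  | [] => true
  | x :: rest =>
    if PySem.List.pyGetD group x 0 ≠ PySem.List.pyGetD array (offset + x) 0 then false
    else pvInnerA group array offset rest

def groupInArray (group : List Int) (array : List Int) : Bool :=
  -- res is the accumulated list of offsets; 'if len(res) < 2: return False / return True'
  if ((PySem.List.pyRange 0 (PySem.List.len array - PySem.List.len group) 1).foldl
        (fun res offset =>
          if pvInnerA group array offset (PySem.List.pyRange 0 (PySem.List.len group) 1)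
          then res ++ [offset] else res)
        ([] : List Int)).length < 2
  then false else true

-- ===== PORT B =====
-- the loop 'for _ in range(len(array)-m)', as structural recursion on the trip count;
-- suffix[:m] is take m, suffix[1:] is drop 1 (both bounds nonnegative, so exact)
def pvScanB (group : List Int) : Nat → List Int → Nat → Bool
  | 0, _, _ => false
  | steps + 1, suffix, hits =>
    if suffix.take group.length = group then
      if hits + 1 = 2 then true
      else pvScanB group steps (suffix.drop 1) (hits + 1)
    else pvScanB group steps (suffix.drop 1) hits

def groupInArray_alt (group : List Int) (array : List Int) : Bool :=
  pvScanB group ((array.length : Int) - (group.length : Int)).toNat array 0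

-- ===== PRECONDITION & SPEC =====
def Spec_groupInArray (group : List Int) (array : List Int) (out : Bool) : Prop := out = groupInArray_alt group array
instance (group : List Int) (array : List Int) (out : Bool) : Decidable (Spec_groupInArray group array out) := by unfold Spec_groupInArray; infer_instance

-- ===== CLAIM (what is proved, stated in full; the proofs are below) =====
def Claim_equal_groupInArray : Prop := ∀ (group : List Int) (array : List Int), Dom_groupInArray group array → Spec_groupInArray group array (groupInArray group array)

-- ===== LEMMAS AND PROOFS =====

/-- number of take-matches among the first `k` suffixes -/
def pvCnt (group : List Int) : Nat → List Int → Nat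
  | 0, _ => 0
  | k + 1, s => (if s.take group.length = group then 1 else 0) + pvCnt group k (s.drop 1)

lemma pvScanB_eq_cnt (group : List Int) (k : Nat) :
    ∀ (s : List Int) (hits : Nat), hits ≤ 1 →
      pvScanB group k s hits = decide (2 ≤ hits + pvCnt group k s) := by
  induction k with
  | zero => intro s hits h; simp [pvScanB, pvCnt]; omega
  | succ k ih =>
    intro s hits h
    by_cases hm : s.take group.length = group
    · simp only [pvScanB, pvCnt, hm, if_true]
      by_cases h2 : hits + 1 = 2
      · rw [if_pos h2, eq_comm, decide_eq_true_eq]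
        omega
      · rw [if_neg h2, ih (s.drop 1) (hits + 1) (by omega), decide_eq_decide]
        omega
    · simp only [pvScanB, pvCnt, hm, if_false]
      rw [ih (s.drop 1) hits h, decide_eq_decide]
      omega

lemma pvCnt_eq_countP (group : List Int) (k : Nat) :
    ∀ (s : List Int),
      pvCnt group k s = (List.range k).countP (fun i => decide ((s.drop i).take group.length = group)) := by
  induction k with
  | zero => intro s; simp [pvCnt]
  | succ k ih =>
    intro s
    rw [List.range_succ_eq_map, List.countP_cons, List.countP_map]
    simp only [pvCnt, ih (s.drop 1), List.drop_zero]
    have hc : (List.range k).countP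
          (fun i => decide (((s.drop 1).drop i).take group.length = group))
        = (List.range k).countP
          ((fun i => decide ((s.drop i).take group.length = group)) ∘ Nat.succ) := by
      apply List.countP_congr
      intro i _
      have : (s.drop 1).drop i = s.drop (i + 1) := by rw [List.drop_drop]; ring_nf
      simp [Function.comp, Nat.succ_eq_add_one]
    rw [hc]
    by_cases hm : s.take group.length = group <;> simp [hm]
    omega

/-- the inner loop of A decides slice equality, for in-range offsets -/
lemma pvInnerA_eq (group array : List Int) (i : Nat) (hi : i + group.length ≤ array.length) :
    ∀ (j : Nat), j ≤ group.length →
      pvInnerA group array (i : Int) (PySem.List.pyRange (j : Int) (group.length : Int) 1)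
        = decide (((array.drop i).take group.length).drop j = group.drop j) := by
  intro j hj
  induction hd : group.length - j generalizing j with
  | zero =>
    have hje : j = group.length := by omega
    subst hje
    rw [PySem.List.pyRange_one_eq_nil (by omega)]
    have h1 : ((array.drop i).take group.length).length = group.length := by
      simp; omega
    simp [pvInnerA, List.drop_eq_nil_of_le]
  | succ d ihd =>
    have hjlt : j < group.length := by omega
    rw [PySem.List.pyRange_one_cons (by exact_mod_cast hjlt)]
    have hia : i + j < array.length := by omega
    have hg : PySem.List.pyGetD group (j : Int) 0 = group[j] := by
      rw [PySem.List.pyGetD_natCast]; exact List.getD_eq_getElem _ _ hjlt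
    have ha : PySem.List.pyGetD array ((i : Int) + (j : Int)) 0 = array[i + j] := by
      have : (i : Int) + (j : Int) = ((i + j : Nat) : Int) := by push_cast; ring
      rw [this, PySem.List.pyGetD_natCast]; exact List.getD_eq_getElem _ _ hia
    have hlen : j < ((array.drop i).take group.length).length := by simp; omega
    have key : (((array.drop i).take group.length).drop j = group.drop j)
        ↔ (array[i + j] = group[j]
            ∧ ((array.drop i).take group.length).drop (j + 1) = group.drop (j + 1)) := by
      rw [List.drop_eq_getElem_cons hlen, List.drop_eq_getElem_cons hjlt,
        List.getElem_take, List.getElem_drop]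
      exact List.cons_eq_cons
    simp only [pvInnerA, hg, ha]
    by_cases heq : array[i + j] = group[j]
    · have hstep : ((j : Int) + 1) = ((j + 1 : Nat) : Int) := by push_cast; ring
      rw [if_neg (by simp [heq]), hstep, ihd (j + 1) (by omega) (by omega)]
      simp [key, heq]
    · rw [if_pos (fun h => heq h.symm)]
      simp [key, heq]

lemma pvFoldl_append_if_length {α : Type} (p : α → Bool) :
    ∀ (l : List α) (init : List α),
      (l.foldl (fun r o => if p o then r ++ [o] else r) init).length = init.length + l.countP p := by
  intro l
  induction l with
  | nil => intro init; simp
  | cons x xs ih =>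
    intro init
    simp only [List.foldl_cons, List.countP_cons]
    by_cases hp : p x
    · rw [if_pos hp, ih]; simp [hp]; omega
    · rw [if_neg hp, ih]; simp [hp]

-- ===== VERDICT (by name: the statement is the Claim_ definition above) =====
theorem groupInArray_spec : Claim_equal_groupInArray := by
  intro group array _
  unfold Spec_groupInArray groupInArray groupInArray_alt
  have hrange : PySem.List.pyRange 0 (PySem.List.len array - PySem.List.len group) 1
      = (List.range (((array.length : Int) - (group.length : Int)).toNat)).map
          (fun k => ((k : Nat) : Int)) := by
    rw [PySem.List.len_eq, PySem.List.len_eq, PySem.List.pyRange_one]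
    simp
  rw [hrange, pvScanB_eq_cnt group _ array 0 (by omega), pvCnt_eq_countP,
    pvFoldl_append_if_length, List.countP_map]
  have hc : (List.range (((array.length : Int) - (group.length : Int)).toNat)).countP
        ((fun offset => pvInnerA group array offset
            (PySem.List.pyRange 0 (PySem.List.len group) 1)) ∘ (fun k => ((k : Nat) : Int)))
      = (List.range (((array.length : Int) - (group.length : Int)).toNat)).countP
        (fun i => decide ((array.drop i).take group.length = group)) := by
    apply List.countP_congr
    intro i hi
    simp only [List.mem_range] at hi
    have hiK : i + group.length ≤ array.length := by omega
    have h0 := pvInnerA_eq group array i hiK 0 (by omega)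
    simp only [Function.comp, PySem.List.len_eq]
    simp only [Nat.cast_zero, List.drop_zero] at h0
    rw [h0]
    exact Iff.rfl
  rw [hc]
  simp only [List.length_nil, Nat.zero_add]
  rcases Nat.lt_or_ge ((List.range (((array.length : Int) - (group.length : Int)).toNat)).countP
      (fun i => decide ((array.drop i).take group.length = group))) 2 with h | h
  · rw [if_pos h, eq_comm, decide_eq_false_iff_not]
    omega
  · rw [if_neg (by omega), eq_comm, decide_eq_true_eq]
    omega
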